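-- pv_equiv track=rewrite | github.com/EDA-SEC-04-EQUIPO-08/EDA-2020-20-reto-4-SEC-04-Grupo-08 | App/model.py | compareWithMax
-- ===== SOURCE A (Python) =====
-- def compareWithMax(dict,num,vert):
--     statTup= (num,vert)
--     if statTup > dict["1mayor"]:
--         x = 1
--         if statTup > dict["2mayor"]:
--             x = 2
--             if statTup > dict["3mayor"]:
--                 x = 3
--         key1 = str(x)+"mayor"
--         value1 = dict[key1]
--         for i in range(0,x):
--             key2 = str(x-(i))+"mayor"
--             value2 = dict[key2]
--             dict[key2] = value1
--             value1 = value2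
--         dict[str(x)+"mayor"] = statTup
--     return dict
-- ===== SOURCE B (Python) =====
-- def compareWithMax(dict, num, vert):
--     t = (num, vert)
--     if t <= dict["1mayor"]:
--         return dict
--     v2 = dict["2mayor"]
--     if t <= v2:
--         dict["1mayor"] = t
--         return dict
--     dict["1mayor"] = v2
--     v3 = dict["3mayor"]
--     if t <= v3:
--         dict["2mayor"] = t
--         return dict
--     dict["2mayor"] = v3
--     dict["3mayor"] = t
--     return dict
-- ===== Notes on version B (the rewrite author's own statement) =====
-- stated objective: simpler
-- what changed: Replaced the nested position search plus the generic range-loop rotation over string-built keys with a straight-line cascading bubble insert: compare against each slot in turn, shift the one displaced value down, and early-return; no loop, no computed key names, no x counter.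
import Mathlib
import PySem

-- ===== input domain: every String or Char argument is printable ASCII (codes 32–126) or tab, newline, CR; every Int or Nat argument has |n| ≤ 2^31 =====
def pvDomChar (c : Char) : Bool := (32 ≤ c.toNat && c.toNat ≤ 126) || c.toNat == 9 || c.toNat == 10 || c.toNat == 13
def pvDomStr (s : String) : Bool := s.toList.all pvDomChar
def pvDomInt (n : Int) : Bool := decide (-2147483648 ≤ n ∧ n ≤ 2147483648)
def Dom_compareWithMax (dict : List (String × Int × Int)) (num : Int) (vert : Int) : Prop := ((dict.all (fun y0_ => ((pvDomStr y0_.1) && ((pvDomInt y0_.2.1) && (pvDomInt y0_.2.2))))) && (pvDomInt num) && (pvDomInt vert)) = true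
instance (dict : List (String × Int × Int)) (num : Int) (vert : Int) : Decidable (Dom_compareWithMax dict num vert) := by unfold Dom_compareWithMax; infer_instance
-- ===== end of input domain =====

-- B replaces A's position search + rotation loop over string-built keys by a straight-line
-- cascading bubble insert (objective: simpler). Both mutate the dict in place in Python; the
-- equivalence proved here is about the returned dict's item list.

-- Python '>' / '<=' on int pairs: lexicographic (exact)
def pyGtII (a b : Int × Int) : Bool := decide (b.1 < a.1) || (a.1 == b.1 && decide (b.2 < a.2))
def pyLeII (a b : Int × Int) : Bool := decide (a.1 < b.1) || (a.1 == b.1 && decide (a.2 ≤ b.2))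

-- ===== PORT A =====
def mayorKey (x : Int) : String := PySem.Int.toStr x ++ "mayor"

-- key1 lookup, the shift loop over range(0,x), and the final store (A's tail after x is fixed).
-- The getD default (0,0) stands for KeyError: on every path that reaches this helper the keys
-- "1mayor".."<x>mayor" are present (they were just looked up), so the default is never used.
def shiftIns (d : PySem.Dict String (Int × Int)) (t : Int × Int) (x : Int) :
    PySem.Dict String (Int × Int) :=
  let key1 := mayorKey x
  let value1 := d.getD key1 (0, 0)
  let st := (PySem.List.pyRange 0 x 1).foldl
    (fun (s : PySem.Dict String (Int × Int) × (Int × Int)) i =>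
      let key2 := mayorKey (x - i)
      let value2 := s.1.getD key2 (0, 0)
      (s.1.insert key2 s.2, value2)) (d, value1)
  st.1.insert (mayorKey x) t

def compareWithMax (dict : List (String × Int × Int)) (num : Int) (vert : Int) :
    List (String × Int × Int) :=
  let statTup := (num, vert)
  let d : PySem.Dict String (Int × Int) := PySem.Dict.mk dict
  match d.get? "1mayor" with
  | none => dict  -- KeyError (excluded by Pre_)
  | some m1 =>
    if pyGtII statTup m1 then
      match d.get? "2mayor" with
      | none => dict  -- KeyError (excluded by Pre_)
      | some m2 =>
        if pyGtII statTup m2 then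
          match d.get? "3mayor" with
          | none => dict  -- KeyError (excluded by Pre_)
          | some m3 =>
            if pyGtII statTup m3 then (shiftIns d statTup 3).items
            else (shiftIns d statTup 2).items
        else (shiftIns d statTup 1).items
    else dict

-- ===== PORT B =====
def compareWithMax_alt (dict : List (String × Int × Int)) (num : Int) (vert : Int) :
    List (String × Int × Int) :=
  let t := (num, vert)
  let d : PySem.Dict String (Int × Int) := PySem.Dict.mk dict
  match d.get? "1mayor" with
  | none => dict  -- KeyError (excluded by Pre_)
  | some v1 =>
    if pyLeII t v1 then dict
    else
      match d.get? "2mayor" with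
      | none => dict  -- KeyError (excluded by Pre_)
      | some v2 =>
        if pyLeII t v2 then (d.insert "1mayor" t).items
        else
          let d1 := d.insert "1mayor" v2
          match d1.get? "3mayor" with
          | none => d1.items  -- KeyError (excluded by Pre_)
          | some v3 =>
            if pyLeII t v3 then (d1.insert "2mayor" t).items
            else ((d1.insert "2mayor" v3).insert "3mayor" t).items

-- ===== PRECONDITION & SPEC =====
-- Pre_ is exactly A's return set: A raises KeyError on the slot keys it reads along its path
-- ("1mayor" always; "2mayor" if statTup beats slot 1; "3mayor" if it also beats slot 2).
def Pre_compareWithMax (dict : List (String × Int × Int)) (num : Int) (vert : Int) : Prop :=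
  (PySem.Dict.mk dict).contains "1mayor" = true ∧
  (pyGtII (num, vert) ((PySem.Dict.mk dict).getD "1mayor" (0, 0)) = true →
    (PySem.Dict.mk dict).contains "2mayor" = true ∧
    (pyGtII (num, vert) ((PySem.Dict.mk dict).getD "2mayor" (0, 0)) = true →
      (PySem.Dict.mk dict).contains "3mayor" = true))
instance (dict : List (String × Int × Int)) (num : Int) (vert : Int) :
    Decidable (Pre_compareWithMax dict num vert) := by unfold Pre_compareWithMax; infer_instance

def pvWitness_compareWithMax : (List (String × Int × Int)) × Int × Int :=
  ([("1mayor", (1, 4)), ("2mayor", (3, 0)), ("3mayor", (7, 2))], 5, 5)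

def Spec_compareWithMax (dict : List (String × Int × Int)) (num : Int) (vert : Int)
    (out : List (String × Int × Int)) : Prop := out = compareWithMax_alt dict num vert
instance (dict : List (String × Int × Int)) (num : Int) (vert : Int)
    (out : List (String × Int × Int)) : Decidable (Spec_compareWithMax dict num vert out) := by
  unfold Spec_compareWithMax; infer_instance

-- ===== CLAIM (what is proved, stated in full; the proofs are below) =====
def Claim_equal_compareWithMax : Prop := ∀ (dict : List (String × Int × Int)) (num : Int) (vert : Int), Dom_compareWithMax dict num vert → Pre_compareWithMax dict num vert → Spec_compareWithMax dict num vert (compareWithMax dict num vert)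

-- ===== LEMMAS AND PROOFS =====

theorem pyLe_eq_not_gt (a b : Int × Int) : pyLeII a b = !pyGtII a b := by
  rcases a with ⟨a1, a2⟩; rcases b with ⟨b1, b2⟩
  simp only [pyGtII, pyLeII]
  by_cases h1 : a1 < b1 <;> by_cases h2 : b1 < a1 <;> by_cases h3 : a1 = b1 <;>
    by_cases h4 : a2 ≤ b2 <;> simp_all <;> omega

theorem insert_comm_of_contains {κ ν : Type} [BEq κ] [LawfulBEq κ]
    (d : PySem.Dict κ ν) (k1 k2 : κ) (a b : ν)
    (h1 : d.contains k1 = true) (h2 : d.contains k2 = true) (hne : k1 ≠ k2) :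
    (d.insert k1 a).insert k2 b = (d.insert k2 b).insert k1 a := by
  apply PySem.Dict.ext
  have c12 : (d.insert k1 a).contains k2 = true := by
    rw [PySem.Dict.contains_insert]; simp [h2]
  have c21 : (d.insert k2 b).contains k1 = true := by
    rw [PySem.Dict.contains_insert]; simp [h1]
  rw [PySem.Dict.items_insert_of_contains _ _ c12,
      PySem.Dict.items_insert_of_contains _ _ h1,
      PySem.Dict.items_insert_of_contains _ _ c21,
      PySem.Dict.items_insert_of_contains _ _ h2,
      List.map_map, List.map_map]
  apply List.map_congr_left
  intro p _
  simp only [Function.comp_apply]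
  by_cases e1 : p.1 = k1 <;> by_cases e2 : p.1 = k2 <;>
    simp_all [beq_iff_eq, Ne.symm hne]

-- ===== VERDICT =====
theorem compareWithMax_spec : Claim_equal_compareWithMax := by
  unfold Claim_equal_compareWithMax
  intro dict num vert _ hpre
  unfold Spec_compareWithMax compareWithMax compareWithMax_alt
  obtain ⟨hc1, hrest⟩ := hpre
  set d : PySem.Dict String (Int × Int) := PySem.Dict.mk dict with hd
  rw [PySem.Dict.contains_eq_isSome_get?] at hc1
  cases hg1 : d.get? "1mayor" with
  | none => simp [hg1] at hc1
  | some v1 =>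
    simp only [hg1]
    rw [pyLe_eq_not_gt]
    have hgd1 : d.getD "1mayor" (0, 0) = v1 := PySem.Dict.getD_of_get?_eq_some _ _ hg1
    cases hgt1 : pyGtII (num, vert) v1 with
    | false => simp
    | true =>
      simp only [Bool.not_true, Bool.false_eq_true, if_false, if_true]
      obtain ⟨hc2, hrest2⟩ := hrest (by simp [hgd1, hgt1])
      rw [PySem.Dict.contains_eq_isSome_get?] at hc2
      cases hg2 : d.get? "2mayor" with
      | none => simp [hg2] at hc2
      | some v2 =>
        dsimp only
        rw [pyLe_eq_not_gt]
        have hgd2 : d.getD "2mayor" (0, 0) = v2 := PySem.Dict.getD_of_get?_eq_some _ _ hg2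
        have hcb1 : d.contains "1mayor" = true := by
          rw [PySem.Dict.contains_eq_isSome_get?, hg1]; rfl
        have hcb2 : d.contains "2mayor" = true := by
          rw [PySem.Dict.contains_eq_isSome_get?, hg2]; rfl
        cases hgt2 : pyGtII (num, vert) v2 with
        | false =>
          -- x = 1 : statTup goes into slot 1, slots 2 and 3 untouched
          simp only [Bool.not_false, Bool.false_eq_true, if_false, if_true]
          have heq : shiftIns d (num, vert) 1 = d.insert "1mayor" (num, vert) := by
            unfold shiftIns
            have hk : mayorKey 1 = "1mayor" := by decide
            have hr : PySem.List.pyRange 0 1 1 = [0] := by decide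
            have e0 : (1 : Int) - 0 = 1 := by decide
            simp only [hk, hr, List.foldl_cons, List.foldl_nil, e0]
            rw [PySem.Dict.insert_insert_self]
          rw [heq]
        | true =>
          simp only [Bool.not_true, Bool.false_eq_true, if_false, if_true]
          obtain hc3 := hrest2 (by simp [hgd2, hgt2])
          rw [PySem.Dict.contains_eq_isSome_get?] at hc3
          have hg3' : (d.insert "1mayor" v2).get? "3mayor" = d.get? "3mayor" :=
            PySem.Dict.get?_insert_of_ne _ _ (by decide)
          cases hg3 : d.get? "3mayor" with
          | none => simp [hg3] at hc3
          | some v3 =>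
            rw [hg3] at hg3'
            simp only [hg3']
            rw [pyLe_eq_not_gt]
            have hgd3 : d.getD "3mayor" (0, 0) = v3 := PySem.Dict.getD_of_get?_eq_some _ _ hg3
            have hcb3 : d.contains "3mayor" = true := by
              rw [PySem.Dict.contains_eq_isSome_get?, hg3]; rfl
            cases hgt3 : pyGtII (num, vert) v3 with
            | false =>
              -- x = 2 : slot2 value drops to slot1, statTup into slot 2
              simp only [Bool.not_false, Bool.false_eq_true, if_false, if_true]
              have heq : shiftIns d (num, vert) 2
                  = (d.insert "1mayor" v2).insert "2mayor" (num, vert) := by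
                unfold shiftIns
                have hk2 : mayorKey 2 = "2mayor" := by decide
                have hk1 : mayorKey 1 = "1mayor" := by decide
                have hr : PySem.List.pyRange 0 2 1 = [0, 1] := by decide
                have e0 : (2 : Int) - 0 = 2 := by decide
                have e1 : (2 : Int) - 1 = 1 := by decide
                simp only [hk2, hr, List.foldl_cons, List.foldl_nil, e0, e1, hk1, hgd2]
                rw [insert_comm_of_contains d "2mayor" "1mayor" _ _ hcb2 hcb1 (by decide),
                    PySem.Dict.insert_insert_self]
              rw [heq]
            | true =>
              -- x = 3 : full rotation, statTup into slot 3
              simp only [Bool.not_true, Bool.false_eq_true, if_false, if_true]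
              have heq : shiftIns d (num, vert) 3
                  = ((d.insert "1mayor" v2).insert "2mayor" v3).insert "3mayor" (num, vert) := by
                unfold shiftIns
                have hk3 : mayorKey 3 = "3mayor" := by decide
                have hk2 : mayorKey 2 = "2mayor" := by decide
                have hk1 : mayorKey 1 = "1mayor" := by decide
                have hr : PySem.List.pyRange 0 3 1 = [0, 1, 2] := by decide
                have e0 : (3 : Int) - 0 = 3 := by decide
                have e1 : (3 : Int) - 1 = 2 := by decide
                have e2 : (3 : Int) - 2 = 1 := by decide
                simp only [hk3, hr, List.foldl_cons, List.foldl_nil, e0, e1, e2, hk2, hk1, hgd3]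
                rw [PySem.Dict.getD_insert_of_ne _ _ _ (by decide), hgd2]
                -- ((d.ins3 v3).ins2 v3).ins1 v2 |>.ins3 t  =  ((d.ins1 v2).ins2 v3).ins3 t
                rw [insert_comm_of_contains d "3mayor" "2mayor" _ _ hcb3 hcb2 (by decide)]
                have c3'' : (d.insert "2mayor" v3).contains "3mayor" = true := by
                  rw [PySem.Dict.contains_insert]; simp [hcb3]
                have c1'' : (d.insert "2mayor" v3).contains "1mayor" = true := by
                  rw [PySem.Dict.contains_insert]; simp [hcb1]
                rw [insert_comm_of_contains (d.insert "2mayor" v3) "3mayor" "1mayor" _ _ c3'' c1'' (by decide)]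
                rw [PySem.Dict.insert_insert_self]
                rw [insert_comm_of_contains d "2mayor" "1mayor" _ _ hcb2 hcb1 (by decide)]
              rw [heq]
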